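-- pv_equiv track=rewrite | github.com/anywgchao/dongcha-waf | dongcha-waf-manager/SettingManage/views.py | deal_list
-- ===== SOURCE A (Python) =====
-- def deal_list(lists):
--     for i in range(24):
--         if len(lists) < 24:
--             lists.append('')
--         else:
--             break
--     lists.reverse()
--     return lists
-- ===== SOURCE B (Python) =====
-- def deal_list(lists):
--     # Drain the list from the tail onto an accumulator (reversing it), then pad
--     # the FRONT with '' until length 24, assigning back in place.
--     acc = []
--     while lists:
--         acc.append(lists.pop())
--     while len(acc) < 24:
--         acc.insert(0, '')
--     lists[:] = acc
--     return lists
-- ===== Notes on version B (the rewrite author's own statement) =====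
-- stated objective: alternative
-- what changed: Instead of padding at the tail up to 24 and then reversing in place, B drains the list by popping from its tail onto an accumulator (producing the reversal) and then pads the FRONT with '' until length 24, assigning back in place.
import Mathlib
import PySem

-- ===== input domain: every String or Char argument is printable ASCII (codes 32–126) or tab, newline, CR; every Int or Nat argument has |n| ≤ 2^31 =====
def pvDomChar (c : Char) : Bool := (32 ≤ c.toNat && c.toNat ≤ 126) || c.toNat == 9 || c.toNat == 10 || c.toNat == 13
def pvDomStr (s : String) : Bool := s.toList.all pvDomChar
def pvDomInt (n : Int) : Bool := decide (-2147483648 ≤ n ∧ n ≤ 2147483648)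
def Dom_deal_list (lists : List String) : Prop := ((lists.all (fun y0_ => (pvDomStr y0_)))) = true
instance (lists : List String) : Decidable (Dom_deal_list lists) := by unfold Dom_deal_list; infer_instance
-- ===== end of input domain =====

-- B mutates the argument in place (lists[:] = acc) just as A does; the theorems are about the return value.

-- ===== PORT A =====
-- loop: for i in range(24): append '' while len<24 else break
def dealLoopA : Nat → List String → List String
  | 0, xs => xs
  | n+1, xs => if xs.length < 24 then dealLoopA n (xs ++ [""]) else xs

def deal_list (lists : List String) : List String :=
  (dealLoopA 24 lists).reverse

-- ===== PORT B =====
-- while lists: acc.append(lists.pop())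
def dealDrainB (xs acc : List String) : List String :=
  if h : xs = [] then acc
  else dealDrainB xs.dropLast (acc ++ [xs.getLast h])
termination_by xs.length
decreasing_by simp [List.length_dropLast]; exact List.length_pos_iff.mpr h

-- while len(acc) < 24: acc.insert(0, ''); the while runs at most 24 times, ported with fuel 24
def dealPadB : Nat → List String → List String
  | 0, acc => acc
  | n+1, acc => if acc.length < 24 then dealPadB n ("" :: acc) else acc

def deal_list_alt (lists : List String) : List String :=
  dealPadB 24 (dealDrainB lists [])

-- ===== PRECONDITION & SPEC =====
def Spec_deal_list (lists : List String) (out : List String) : Prop := out = deal_list_alt lists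
instance (lists : List String) (out : List String) : Decidable (Spec_deal_list lists out) := by unfold Spec_deal_list; infer_instance

-- ===== CLAIM =====
def Claim_equal_deal_list : Prop := ∀ (lists : List String), Dom_deal_list lists → Spec_deal_list lists (deal_list lists)

-- ===== LEMMAS AND PROOFS =====
lemma dealLoopA_spec (n : Nat) (xs : List String) :
    dealLoopA n xs = xs ++ List.replicate (min n (24 - xs.length)) "" := by
  induction n generalizing xs with
  | zero => simp [dealLoopA]
  | succ n ih =>
    simp only [dealLoopA]
    split_ifs with h
    · rw [ih]
      have h1 : min (n+1) (24 - xs.length) = (min n (24 - (xs.length + 1))) + 1 := by omega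
      simp [h1, List.replicate_succ, List.append_assoc]
    · have h0 : 24 - xs.length = 0 := by omega
      simp [h0]

lemma dealDrainB_spec (xs : List String) : ∀ acc, dealDrainB xs acc = acc ++ xs.reverse := by
  induction xs using List.reverseRecOn with
  | nil => intro acc; rw [dealDrainB]; simp
  | append_singleton ys y ih =>
    intro acc
    rw [dealDrainB, dif_neg (by simp)]
    simp [ih]

lemma dealPadB_spec (n : Nat) (acc : List String) :
    dealPadB n acc = List.replicate (min n (24 - acc.length)) "" ++ acc := by
  induction n generalizing acc with
  | zero => simp [dealPadB]
  | succ n ih =>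
    simp only [dealPadB]
    split_ifs with h
    · rw [ih]
      have h1 : min (n+1) (24 - acc.length) = (min n (24 - (acc.length + 1))) + 1 := by omega
      simp [h1, List.replicate_succ', List.append_assoc]
    · have h0 : 24 - acc.length = 0 := by omega
      simp [h0]

-- ===== VERDICT =====
theorem deal_list_spec : Claim_equal_deal_list := by
  intro lists _
  unfold Spec_deal_list deal_list deal_list_alt
  rw [dealLoopA_spec, dealDrainB_spec, dealPadB_spec]
  simp
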